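-- pv_equiv track=rewrite | github.com/zainlock/pro | views.py | extract_media_list_info
-- ===== SOURCE A (Python) =====
-- def extract_media_list_info(crawled_data):
--     image_count = 0
--     link_count = 0
--     for data in crawled_data.values():
--         tags_data = data.get("tags_data", {})
--         for tag_info in tags_data.values():
--             if tag_info["name"] == "img":
--                 image_count += 1
--             elif tag_info["name"] == "a":
--                 link_count += 1
--     return {"image_count": image_count, "link_count": link_count}
-- ===== SOURCE B (Python) =====
-- def extract_media_list_info(crawled_data):
--     def names_of(data):
--         return [tag_info["name"] for tag_info in data.get("tags_data", {}).values()]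
--
--     def count(entries, tag):
--         if not entries:
--             return 0
--         if len(entries) == 1:
--             return names_of(entries[0]).count(tag)
--         mid = len(entries) // 2
--         return count(entries[:mid], tag) + count(entries[mid:], tag)
--
--     entries = list(crawled_data.values())
--     return {"image_count": count(entries, "img"), "link_count": count(entries, "a")}
-- ===== Notes on version B (the rewrite author's own statement) =====
-- stated objective: alternative
-- what changed: Replaces A's single branching accumulator loop with a divide-and-conquer recursion: the list of crawl entries is split in half, 'img' and 'a' occurrences are counted recursively in each half and the subtotals are summed (correct because counting a tag distributes over list concatenation).
import Mathlib
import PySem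

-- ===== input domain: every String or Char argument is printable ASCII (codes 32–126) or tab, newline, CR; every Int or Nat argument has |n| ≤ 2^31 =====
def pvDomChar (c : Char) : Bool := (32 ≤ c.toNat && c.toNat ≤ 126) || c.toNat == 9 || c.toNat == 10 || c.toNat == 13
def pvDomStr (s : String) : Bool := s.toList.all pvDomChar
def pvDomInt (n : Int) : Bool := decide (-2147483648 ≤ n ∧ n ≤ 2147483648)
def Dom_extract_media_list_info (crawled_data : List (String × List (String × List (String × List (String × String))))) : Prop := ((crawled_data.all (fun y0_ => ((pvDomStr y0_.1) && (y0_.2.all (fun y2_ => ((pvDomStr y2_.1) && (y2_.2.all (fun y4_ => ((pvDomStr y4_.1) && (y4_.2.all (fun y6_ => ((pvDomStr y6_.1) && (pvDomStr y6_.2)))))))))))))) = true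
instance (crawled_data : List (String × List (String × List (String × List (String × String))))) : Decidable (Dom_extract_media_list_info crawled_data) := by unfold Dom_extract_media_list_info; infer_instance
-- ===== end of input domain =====

-- B replaces A's single branching counter loop with a divide-and-conquer recursion that splits the entry list in half and sums the halves' tag counts.
-- Pre_ excludes inputs where some reached tag_info dict lacks the key "name", on which the Python A raises KeyError.

-- ===== PORT A =====
def extract_media_list_info (crawled_data : List (String × List (String × List (String × List (String × String))))) : List (String × Int) :=
  let counts :=
    (PySem.Dict.ofList crawled_data).values.foldl (fun (acc : Int × Int) data =>
      let tags_data := PySem.Dict.ofList ((PySem.Dict.ofList data).getD "tags_data" [])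
      tags_data.values.foldl (fun (acc : Int × Int) tag_info =>
        if (PySem.Dict.ofList tag_info).getD "name" "" = "img" then (acc.1 + 1, acc.2)
        else if (PySem.Dict.ofList tag_info).getD "name" "" = "a" then (acc.1, acc.2 + 1)
        else acc) acc) (0, 0)
  [("image_count", counts.1), ("link_count", counts.2)]

-- ===== PORT B =====
-- names_of from Source B
def pvNamesOf (data : List (String × List (String × List (String × String)))) : List String :=
  (PySem.Dict.ofList ((PySem.Dict.ofList data).getD "tags_data" [])).values.map
    (fun tag_info => (PySem.Dict.ofList tag_info).getD "name" "")

-- count from Source B: divide and conquer. len(entries)//2 on a nonnegative length is Nat division;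
-- entries[:mid] / entries[mid:] with 0 ≤ mid ≤ len are List.take mid / List.drop mid.
def pvCount (entries : List (List (String × List (String × List (String × String))))) (tag : String) : Int :=
  if entries = [] then 0
  else if entries.length = 1 then ((pvNamesOf (entries.headD [])).count tag : Int)
  else
    let mid := entries.length / 2
    pvCount (entries.take mid) tag + pvCount (entries.drop mid) tag
termination_by entries.length
decreasing_by
  all_goals
    rename_i hne h1
    have h0 : entries.length ≠ 0 := fun h => hne (List.length_eq_zero_iff.mp h)
    simp [List.length_take, List.length_drop]
    omega

def extract_media_list_info_alt (crawled_data : List (String × List (String × List (String × List (String × String))))) : List (String × Int) :=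
  let entries := (PySem.Dict.ofList crawled_data).values
  [("image_count", pvCount entries "img"), ("link_count", pvCount entries "a")]

-- ===== PRECONDITION & SPEC =====
def Pre_extract_media_list_info (crawled_data : List (String × List (String × List (String × List (String × String))))) : Prop :=
  ((PySem.Dict.ofList crawled_data).values.all (fun data =>
    (PySem.Dict.ofList ((PySem.Dict.ofList data).getD "tags_data" [])).values.all
      (fun tag_info => (PySem.Dict.ofList tag_info).contains "name"))) = true
instance (crawled_data : List (String × List (String × List (String × List (String × String))))) : Decidable (Pre_extract_media_list_info crawled_data) := by unfold Pre_extract_media_list_info; infer_instance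
def pvWitness_extract_media_list_info : (List (String × List (String × List (String × List (String × String))))) :=
  [("u", [("tags_data", [("t1", [("name", "img")]), ("t2", [("name", "a")])])])]

def Spec_extract_media_list_info (crawled_data : List (String × List (String × List (String × List (String × String))))) (out : List (String × Int)) : Prop := out = extract_media_list_info_alt crawled_data
instance (crawled_data : List (String × List (String × List (String × List (String × String))))) (out : List (String × Int)) : Decidable (Spec_extract_media_list_info crawled_data out) := by unfold Spec_extract_media_list_info; infer_instance

-- ===== CLAIM (what is proved, stated in full; the proofs are below) =====
def Claim_equal_extract_media_list_info : Prop := ∀ (crawled_data : List (String × List (String × List (String × List (String × String))))), Dom_extract_media_list_info crawled_data → Pre_extract_media_list_info crawled_data → Spec_extract_media_list_info crawled_data (extract_media_list_info crawled_data)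

-- ===== LEMMAS AND PROOFS =====

-- B's divide-and-conquer count equals the occurrence count of tag among all names.
theorem pvCount_eq (entries : List (List (String × List (String × List (String × String))))) (tag : String) :
    pvCount entries tag = ((entries.flatMap pvNamesOf).count tag : Int) := by
  fun_induction pvCount entries tag with
  | case1 => simp
  | case2 entries hne h1 =>
    obtain ⟨a, ha⟩ := List.length_eq_one_iff.mp h1
    subst ha; simp
  | case3 entries hne h1 mid ih1 ih2 =>
    rw [ih1, ih2]
    conv_rhs => rw [← List.take_append_drop (entries.length / 2) entries]
    rw [List.flatMap_append, List.count_append]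
    push_cast
    ring

-- Inner loop of A over one tags_data values list: branching counter fold = adding counts of "img"/"a".
theorem inner_fold_counts (ts : List (List (String × String))) (ic lc : Int) :
    ts.foldl (fun (acc : Int × Int) tag_info =>
        if (PySem.Dict.ofList tag_info).getD "name" "" = "img" then (acc.1 + 1, acc.2)
        else if (PySem.Dict.ofList tag_info).getD "name" "" = "a" then (acc.1, acc.2 + 1)
        else acc) (ic, lc)
      = (ic + ((ts.map (fun tag_info => (PySem.Dict.ofList tag_info).getD "name" "")).count "img" : Int),
         lc + ((ts.map (fun tag_info => (PySem.Dict.ofList tag_info).getD "name" "")).count "a" : Int)) := by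
  induction ts generalizing ic lc with
  | nil => simp [List.foldl]
  | cons t rest ih =>
    simp only [List.foldl, List.map, List.count_cons]
    by_cases h1 : (PySem.Dict.ofList t).getD "name" "" = "img"
    · simp [h1, ih]; try omega
    · by_cases h2 : (PySem.Dict.ofList t).getD "name" "" = "a"
      · simp [h2, ih]; try omega
      · simp [h1, h2, ih]

theorem outer_fold_counts (ds : List (List (String × List (String × List (String × String))))) (ic lc : Int) :
    ds.foldl (fun (acc : Int × Int) data =>
        let tags_data := PySem.Dict.ofList ((PySem.Dict.ofList data).getD "tags_data" [])
        tags_data.values.foldl (fun (acc : Int × Int) tag_info =>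
          if (PySem.Dict.ofList tag_info).getD "name" "" = "img" then (acc.1 + 1, acc.2)
          else if (PySem.Dict.ofList tag_info).getD "name" "" = "a" then (acc.1, acc.2 + 1)
          else acc) acc) (ic, lc)
      = (ic + ((ds.flatMap pvNamesOf).count "img" : Int),
         lc + ((ds.flatMap pvNamesOf).count "a" : Int)) := by
  induction ds generalizing ic lc with
  | nil => simp [List.foldl]
  | cons d rest ih =>
    simp only [List.foldl, List.flatMap_cons, List.count_append]
    rw [inner_fold_counts, ih]
    simp only [pvNamesOf]
    push_cast
    ring_nf

-- ===== VERDICT (by name: the statement is the Claim_ definition above) =====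
theorem extract_media_list_info_spec : Claim_equal_extract_media_list_info := by
  intro crawled_data _ _
  unfold Spec_extract_media_list_info extract_media_list_info extract_media_list_info_alt
  simp only
  rw [outer_fold_counts, pvCount_eq, pvCount_eq]
  simp
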